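-- pv_equiv track=rewrite | github.com/MrBrantCode/unitest_baseline | mut_generate/mist_train_cf/cf_76803/solution.py | shortest_city_names
-- ===== SOURCE A (Python) =====
-- def shortest_city_names(city_list):
--     country_city = {}
--     for city, country in city_list:
--         if country in country_city.keys():
--             if len(city) < len(country_city[country][0]):
--                 country_city[country] = [city]
--             elif len(city) == len(country_city[country][0]):
--                 country_city[country].append(city)
--         else:
--             country_city[country] = [city]
--     return country_city
-- ===== SOURCE B (Python) =====
-- def shortest_city_names(city_list):
--     # pass 1: group all city names by country, preserving first-seen country order
--     groups = {}
--     for city, country in city_list: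
--         groups.setdefault(country, []).append(city)
--     # pass 2: per country keep exactly the names of minimal length, in original order
--     result = {}
--     for country, cities in groups.items():
--         m = min(len(c) for c in cities)
--         result[country] = [c for c in cities if len(c) == m]
--     return result
-- ===== Notes on version B (the rewrite author's own statement) =====
-- stated objective: simpler
-- what changed: Replaces A's online running-minimum dict updates (reset/append/skip per element against the stored list's head) by two plain passes: group every city under its country, then per country compute the minimal length once and filter; the per-element three-way comparison logic disappears.
import Mathlib
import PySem

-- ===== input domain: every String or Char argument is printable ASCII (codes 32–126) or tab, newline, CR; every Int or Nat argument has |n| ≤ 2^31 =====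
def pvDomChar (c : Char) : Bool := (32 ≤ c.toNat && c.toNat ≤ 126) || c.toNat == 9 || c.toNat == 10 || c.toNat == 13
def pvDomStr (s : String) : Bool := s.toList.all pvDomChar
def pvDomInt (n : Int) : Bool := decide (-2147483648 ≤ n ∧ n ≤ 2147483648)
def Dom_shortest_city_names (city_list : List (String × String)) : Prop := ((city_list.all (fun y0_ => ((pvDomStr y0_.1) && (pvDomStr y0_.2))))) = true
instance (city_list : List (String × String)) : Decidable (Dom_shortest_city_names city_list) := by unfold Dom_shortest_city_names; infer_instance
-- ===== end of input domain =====

-- B replaces A's online running-minimum dict update by two plain passes (group by country, then filter each group by its minimal length); objective: simpler.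

-- ===== PORT A =====
-- one iteration of A's loop body; country_city[country] is ported as getD _ [] and
-- country_city[country][0] as pyGetD _ 0 "" — exact here, since under the contains-guard the
-- stored list is present and nonempty (every stored value is built as [city] or by append)
def pvStepA (d : PySem.Dict String (List String)) (p : String × String) : PySem.Dict String (List String) :=
  if d.contains p.2 then
    if PySem.Str.len p.1 < PySem.Str.len (PySem.List.pyGetD (d.getD p.2 []) 0 "") then
      d.insert p.2 [p.1]
    else if PySem.Str.len p.1 = PySem.Str.len (PySem.List.pyGetD (d.getD p.2 []) 0 "") then
      d.insert p.2 (d.getD p.2 [] ++ [p.1])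
    else d
  else d.insert p.2 [p.1]

def shortest_city_names (city_list : List (String × String)) : List (String × List String) :=
  (city_list.foldl pvStepA PySem.Dict.empty).items

-- ===== PORT B =====
-- m = min(len(c) for c in cities); [c for c in cities if len(c) == m]
-- (min of a nonempty iterable; B only calls this on nonempty groups, so the default 0 is never used)
def pvShortest (cities : List String) : List String :=
  let m := PySem.List.minD (cities.map PySem.Str.len) id 0
  cities.filter (fun c => PySem.Str.len c == m)

def shortest_city_names_alt (city_list : List (String × String)) : List (String × List String) :=
  let groups := city_list.foldl (fun d p => d.modify p.2 [] (· ++ [p.1])) PySem.Dict.empty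
  (groups.items.foldl (fun d p => d.insert p.1 (pvShortest p.2)) PySem.Dict.empty).items

-- ===== PRECONDITION & SPEC =====
def Spec_shortest_city_names (city_list : List (String × String)) (out : List (String × List String)) : Prop := out = shortest_city_names_alt city_list
instance (city_list : List (String × String)) (out : List (String × List String)) : Decidable (Spec_shortest_city_names city_list out) := by unfold Spec_shortest_city_names; infer_instance

-- ===== CLAIM (what is proved, stated in full; the proofs are below) =====
def Claim_equal_shortest_city_names : Prop := ∀ (city_list : List (String × String)), Dom_shortest_city_names city_list → Spec_shortest_city_names city_list (shortest_city_names city_list)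


-- ===== LEMMAS AND PROOFS =====

-- the per-group minimum length (the value B's helper computes first)
def pvMin (cs : List String) : Int := PySem.List.minD (cs.map PySem.Str.len) id 0

theorem pvMin_spec (cs : List String) (h : cs ≠ []) :
    PySem.List.min? (cs.map PySem.Str.len) id = some (pvMin cs) ∧
    (∃ c ∈ cs, PySem.Str.len c = pvMin cs) ∧ (∀ c ∈ cs, pvMin cs ≤ PySem.Str.len c) := by
  have hne : cs.map PySem.Str.len ≠ [] := by simpa using h
  cases hm : PySem.List.min? (cs.map PySem.Str.len) id with
  | none => exact absurd ((PySem.List.min?_eq_none_iff _ _).1 hm) hne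
  | some m =>
    have hmin : pvMin cs = m := by simp [pvMin, PySem.List.minD, hm]
    refine ⟨by rw [hmin], ?_, ?_⟩
    · have := PySem.List.min?_mem hm
      rcases List.mem_map.1 this with ⟨c, hc, hcm⟩
      exact ⟨c, hc, by rw [hcm, hmin]⟩
    · intro c hc
      have := PySem.List.min?_isMin hm (PySem.Str.len c) (List.mem_map_of_mem hc)
      simpa [hmin] using this

theorem pvMin_append (cs : List String) (c : String) (h : cs ≠ []) :
    pvMin (cs ++ [c]) = if PySem.Str.len c < pvMin cs then PySem.Str.len c else pvMin cs := by
  have hm := (pvMin_spec cs h).1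
  have : PySem.List.min? ((cs ++ [c]).map PySem.Str.len) id
      = some (if PySem.Str.len c < pvMin cs then PySem.Str.len c else pvMin cs) := by
    unfold PySem.List.min? at hm ⊢
    rw [List.map_append, List.foldl_append, hm]
    simp only [List.map_cons, List.map_nil, List.foldl_cons, List.foldl_nil, id]
    split_ifs <;> rfl
  show PySem.List.minD _ id 0 = _
  rw [PySem.List.minD, this]
  rfl

theorem pvShortest_def (cs : List String) :
    pvShortest cs = cs.filter (fun c => PySem.Str.len c == pvMin cs) := rfl

theorem pvShortest_head (cs : List String) (h : cs ≠ []) :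
    PySem.Str.len (PySem.List.pyGetD (pvShortest cs) 0 "") = pvMin cs := by
  obtain ⟨-, ⟨c0, hc0, hlen⟩, -⟩ := pvMin_spec cs h
  have hmem : c0 ∈ pvShortest cs := by
    rw [pvShortest_def]
    refine List.mem_filter.2 ⟨hc0, ?_⟩
    simpa [PySem.Str.len] using hlen
  cases hsf : pvShortest cs with
  | nil => rw [hsf] at hmem; simp at hmem
  | cons x t =>
    have hx : x ∈ pvShortest cs := by rw [hsf]; exact List.mem_cons_self
    rw [pvShortest_def] at hx
    have := (List.mem_filter.1 hx).2
    simp only [PySem.List.pyGetD_zero_cons]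
    simpa [PySem.Str.len] using this

theorem pvShortest_singleton (c : String) : pvShortest [c] = [c] := by
  simp [pvShortest, PySem.List.minD, PySem.List.min?]

theorem pvShortest_append_lt (cs : List String) (c : String) (h : cs ≠ [])
    (hlt : PySem.Str.len c < pvMin cs) : pvShortest (cs ++ [c]) = [c] := by
  obtain ⟨-, -, hlb⟩ := pvMin_spec cs h
  rw [pvShortest_def, pvMin_append cs c h, if_pos hlt, List.filter_append]
  have h1 : cs.filter (fun x => PySem.Str.len x == PySem.Str.len c) = [] := by
    rw [List.filter_eq_nil_iff]
    intro a ha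
    have := hlb a ha
    simp only [beq_iff_eq]
    omega
  rw [h1]
  simp

theorem pvShortest_append_eq (cs : List String) (c : String) (h : cs ≠ [])
    (heq : PySem.Str.len c = pvMin cs) : pvShortest (cs ++ [c]) = pvShortest cs ++ [c] := by
  have heq' : (c.length : Int) = pvMin cs := by simpa [PySem.Str.len] using heq
  rw [pvShortest_def, pvShortest_def, pvMin_append cs c h, if_neg (by omega), List.filter_append]
  simp [heq']

theorem pvShortest_append_gt (cs : List String) (c : String) (h : cs ≠ [])
    (hgt : pvMin cs < PySem.Str.len c) : pvShortest (cs ++ [c]) = pvShortest cs := by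
  rw [pvShortest_def, pvShortest_def, pvMin_append cs c h, if_neg (by omega), List.filter_append]
  have : [c].filter (fun x => PySem.Str.len x == pvMin cs) = [] := by
    simp only [List.filter_eq_nil_iff]
    intro a ha
    simp only [List.mem_singleton] at ha
    subst ha
    simp only [beq_iff_eq]
    omega
  rw [this, List.append_nil]

-- the relation between A's dict entries and B's grouping dict entries
def pvG (p : String × List String) : String × List String := (p.1, pvShortest p.2)

theorem pv_contains_map (dA dG : PySem.Dict String (List String)) (k : String)
    (hAG : dA.items = dG.items.map pvG) : dA.contains k = dG.contains k := by
  simp only [PySem.Dict.contains, hAG, List.any_map]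
  congr 1

theorem pv_get?_map (dA dG : PySem.Dict String (List String)) (k : String)
    (hAG : dA.items = dG.items.map pvG) : dA.get? k = (dG.get? k).map pvShortest := by
  simp only [PySem.Dict.get?, hAG, List.find?_map]
  have hfun : ((fun p : String × List String => p.1 == k) ∘ pvG) = (fun p => p.1 == k) := by
    funext p; rfl
  rw [hfun, Option.map_map, Option.map_map]
  rfl

theorem pv_main (l : List (String × String)) (dA dG : PySem.Dict String (List String))
    (hnd : dG.keys.Nodup) (hne : ∀ p ∈ dG.items, p.2 ≠ [])
    (hAG : dA.items = dG.items.map pvG) :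
    (l.foldl pvStepA dA).items =
      (l.foldl (fun d p => d.modify p.2 [] (· ++ [p.1])) dG).items.map pvG := by
  induction l generalizing dA dG with
  | nil => simpa using hAG
  | cons p t ih =>
    simp only [List.foldl_cons]
    apply ih
    · exact PySem.Dict.nodup_keys_insert dG p.2 _ hnd
    · intro q hq
      rcases (PySem.Dict.mem_items_insert dG p.2 (dG.getD p.2 [] ++ [p.1]) q).1 hq with h1 | h2
      · subst h1; simp
      · exact hne q h2.1
    · -- the step preserves the item-wise relation
      have hc := pv_contains_map dA dG p.2 hAG
      by_cases hk : dG.contains p.2 = true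
      · -- country already present
        have hsome : (dG.get? p.2).isSome := by
          rw [← PySem.Dict.contains_eq_isSome_get?]; exact hk
        obtain ⟨cs, hcs⟩ := Option.isSome_iff_exists.1 hsome
        have hcsne : cs ≠ [] := hne (p.2, cs) (PySem.Dict.mem_items_of_get?_eq_some dG hcs)
        have hgdG : dG.getD p.2 [] = cs := by simp [PySem.Dict.getD, hcs]
        have hgdA : dA.getD p.2 [] = pvShortest cs := by
          simp [PySem.Dict.getD, pv_get?_map dA dG p.2 hAG, hcs]
        have hhead : PySem.Str.len (PySem.List.pyGetD (dA.getD p.2 []) 0 "") = pvMin cs := by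
          rw [hgdA]; exact pvShortest_head cs hcsne
        have hmod : dG.modify p.2 [] (· ++ [p.1]) = dG.insert p.2 (cs ++ [p.1]) := by
          simp [PySem.Dict.modify, hgdG]
        have hAc : dA.contains p.2 = true := by rw [hc]; exact hk
        -- generic: insert at an existing key, related item-wise
        have hins : ∀ (w : List String), pvShortest (cs ++ [p.1]) = w →
            (dA.insert p.2 w).items = (dG.insert p.2 (cs ++ [p.1])).items.map pvG := by
          intro w hw
          rw [PySem.Dict.items_insert_of_contains dA w hAc,
              PySem.Dict.items_insert_of_contains dG (cs ++ [p.1]) hk,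
              hAG, List.map_map, List.map_map]
          apply List.map_congr_left
          intro q _
          by_cases hq : q.1 = p.2
          · simp [Function.comp, pvG, hq, hw]
          · simp [Function.comp, pvG, hq]
        unfold pvStepA
        rw [hAc, if_pos rfl, hhead, hmod]
        rcases lt_trichotomy (PySem.Str.len p.1) (pvMin cs) with hlt | heq | hgt
        · rw [if_pos hlt]
          exact hins [p.1] (pvShortest_append_lt cs p.1 hcsne hlt)
        · rw [if_neg (by omega), if_pos heq, hgdA]
          exact hins (pvShortest cs ++ [p.1]) (pvShortest_append_eq cs p.1 hcsne heq)
        · rw [if_neg (by omega), if_neg (by omega)]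
          -- A leaves its dict unchanged; B's append does not change the filtered value
          rw [PySem.Dict.items_insert_of_contains dG (cs ++ [p.1]) hk, hAG, List.map_map]
          apply List.map_congr_left
          intro q hqmem
          by_cases hq : q.1 = p.2
          · have hq2 : q.2 = cs := by
              have : dG.get? q.1 = some q.2 :=
                PySem.Dict.get?_of_mem_items dG (by simpa using hqmem) hnd
              rw [hq, hcs] at this
              exact (Option.some_injective _ this).symm
            simp [Function.comp, pvG, hq, hq2,
              pvShortest_append_gt cs p.1 hcsne hgt]
          · simp [Function.comp, pvG, hq]
      · -- new country
        have hk' : dG.contains p.2 = false := by simpa using hk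
        have hAc : dA.contains p.2 = false := by rw [hc]; exact hk'
        have hmod : dG.modify p.2 [] (· ++ [p.1]) = dG.insert p.2 [p.1] := by
          simp [PySem.Dict.modify, PySem.Dict.getD_of_not_contains dG [] hk']
        unfold pvStepA
        rw [hAc]
        simp only [Bool.false_eq_true, if_false]
        rw [hmod, PySem.Dict.items_insert_of_not_contains dA [p.1] hAc,
            PySem.Dict.items_insert_of_not_contains dG [p.1] hk', hAG, List.map_append]
        simp [pvG, pvShortest_singleton]

-- ===== VERDICT (by name: the statement is the Claim_ definition above) =====
theorem shortest_city_names_spec : Claim_equal_shortest_city_names := by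
  intro city_list _
  unfold Spec_shortest_city_names shortest_city_names shortest_city_names_alt
  have hmain := pv_main city_list PySem.Dict.empty PySem.Dict.empty
    (by simp [PySem.Dict.keys_empty]) (by intro p hp; simp [PySem.Dict.empty] at hp) rfl
  rw [hmain]
  set groups := city_list.foldl (fun d p => d.modify p.2 [] (· ++ [p.1])) PySem.Dict.empty with hgr
  have hnd : groups.keys.Nodup := by
    rw [hgr]
    exact PySem.Dict.nodup_keys_foldl_modify_key city_list (fun p => p.2) []
      (fun _ p v => v ++ [p.1]) PySem.Dict.empty (by simp [PySem.Dict.keys_empty])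
  have hfresh := PySem.Dict.items_foldl_insert_fresh groups.items (fun p => p.1)
    (fun p => pvShortest p.2) PySem.Dict.empty
    (fun a _ => PySem.Dict.contains_empty a.1) (by simpa [PySem.Dict.keys] using hnd)
  rw [hfresh]
  show List.map pvG groups.items = [] ++ List.map (fun a => (a.1, pvShortest a.2)) groups.items
  rw [List.nil_append]
  rfl
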